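-- pv_equiv track=rewrite | github.com/Yuan-Yu/GPUDashboard | ServerSide/GPUDashboard.py | tasksGroupbyGPU
-- ===== SOURCE A (Python) =====
-- def tasksGroupbyGPU(tasks):
--     groupedTasks = {}
--     for task in tasks:
--         if task['uuid'] in groupedTasks:
--             groupedTasks[task['uuid']].append(task)
--         else:
--             groupedTasks[task['uuid']] = [task]
--     return groupedTasks
-- ===== SOURCE B (Python) =====
-- def tasksGroupbyGPU(tasks):
--     # Two-pass grouping: distinct uuids in first-occurrence order, then one filter per uuid.
--     keys = list(dict.fromkeys(task['uuid'] for task in tasks))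
--     return {u: [task for task in tasks if task['uuid'] == u] for u in keys}
-- ===== Notes on version B (the rewrite author's own statement) =====
-- stated objective: alternative
-- what changed: B first collects the distinct uuids in first-occurrence order (dict.fromkeys) and then builds each group by filtering the whole task list once per uuid, replacing A's single-pass incremental dict-append loop.
import Mathlib
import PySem

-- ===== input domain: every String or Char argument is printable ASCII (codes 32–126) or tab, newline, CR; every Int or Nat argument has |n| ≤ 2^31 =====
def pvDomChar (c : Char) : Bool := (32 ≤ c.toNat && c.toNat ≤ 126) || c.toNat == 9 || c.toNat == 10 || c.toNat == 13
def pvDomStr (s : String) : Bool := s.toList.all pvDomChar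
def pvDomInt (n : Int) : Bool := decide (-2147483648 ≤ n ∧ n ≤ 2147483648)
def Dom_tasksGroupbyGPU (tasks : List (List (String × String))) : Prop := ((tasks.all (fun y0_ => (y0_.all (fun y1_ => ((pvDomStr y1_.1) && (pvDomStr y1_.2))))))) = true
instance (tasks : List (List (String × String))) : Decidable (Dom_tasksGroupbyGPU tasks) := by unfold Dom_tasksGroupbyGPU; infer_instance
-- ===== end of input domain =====

-- B groups in two passes (ordered uuid dedup, then one filter per uuid) instead of A's
-- single-pass incremental dict-append loop; alternative decomposition, same result.


-- shared helper: task['uuid'] (Python dict lookup; total via default "", used only under Pre_,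
-- which guarantees the key is present)
def pvKey (t : List (String × String)) : String := ((PySem.Dict.ofList t).get? "uuid").getD ""

-- ===== PORT A =====
def tasksGroupbyGPU (tasks : List (List (String × String))) : List (String × List (List (String × String))) :=
  (tasks.foldl (fun g t =>
      if g.contains (pvKey t) then
        g.insert (pvKey t) (g.getD (pvKey t) [] ++ [t])   -- groupedTasks[u].append(task)
      else
        g.insert (pvKey t) [t]                            -- groupedTasks[u] = [task]
    ) (PySem.Dict.empty : PySem.Dict String (List (List (String × String))))).items

-- ===== PORT B =====
def tasksGroupbyGPU_alt (tasks : List (List (String × String))) : List (String × List (List (String × String))) :=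
  let keys := PySem.List.dedup (tasks.map pvKey)          -- list(dict.fromkeys(...))
  keys.map (fun u => (u, tasks.filter (fun t => pvKey t == u)))

-- ===== PRECONDITION & SPEC =====
-- Pre_ excludes exactly the inputs where a task lacks the key 'uuid', on which Python A
-- raises KeyError (and B raises too).
def Pre_tasksGroupbyGPU (tasks : List (List (String × String))) : Prop :=
  ∀ t ∈ tasks, "uuid" ∈ t.map Prod.fst
instance (tasks : List (List (String × String))) : Decidable (Pre_tasksGroupbyGPU tasks) := by unfold Pre_tasksGroupbyGPU; infer_instance
def pvWitness_tasksGroupbyGPU : (List (List (String × String))) :=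
  [[("uuid", "a")], [("uuid", "b"), ("x", "1")], [("uuid", "a")]]
def Spec_tasksGroupbyGPU (tasks : List (List (String × String))) (out : List (String × List (List (String × String)))) : Prop := out = tasksGroupbyGPU_alt tasks
instance (tasks : List (List (String × String))) (out : List (String × List (List (String × String)))) : Decidable (Spec_tasksGroupbyGPU tasks out) := by unfold Spec_tasksGroupbyGPU; infer_instance

-- ===== CLAIM (what is proved, stated in full; the proofs are below) =====
def Claim_equal_tasksGroupbyGPU : Prop := ∀ (tasks : List (List (String × String))), Dom_tasksGroupbyGPU tasks → Pre_tasksGroupbyGPU tasks → Spec_tasksGroupbyGPU tasks (tasksGroupbyGPU tasks)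

-- ===== LEMMAS AND PROOFS =====

lemma dedup_append_singleton {α : Type} [BEq α] [LawfulBEq α] (xs : List α) (x : α) :
    PySem.List.dedup (xs ++ [x]) = if x ∈ xs then PySem.List.dedup xs else PySem.List.dedup xs ++ [x] := by
  simp [PySem.List.dedup, PySem.Set.ofList, List.foldl_append, PySem.Set.add]
  split_ifs with h1 h2 h2 <;> try rfl
  · exact absurd ((PySem.Set.mem_ofList xs x).mp h1) h2
  · exact absurd ((PySem.Set.mem_ofList xs x).mpr h2) h1

lemma keys_mk_alt (p : List (List (String × String))) :
    (PySem.Dict.mk (tasksGroupbyGPU_alt p)).keys = PySem.List.dedup (p.map pvKey) := by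
  simp [PySem.Dict.keys_mk, tasksGroupbyGPU_alt, Function.comp_def]

-- one step of A's loop, applied to B's value for the prefix, gives B's value for the
-- prefix extended by one task
lemma fold_step (p : List (List (String × String))) (t : List (String × String)) :
    (if (PySem.Dict.mk (tasksGroupbyGPU_alt p)).contains (pvKey t) then
        (PySem.Dict.mk (tasksGroupbyGPU_alt p)).insert (pvKey t)
          ((PySem.Dict.mk (tasksGroupbyGPU_alt p)).getD (pvKey t) [] ++ [t])
      else
        (PySem.Dict.mk (tasksGroupbyGPU_alt p)).insert (pvKey t) [t]) =
    PySem.Dict.mk (tasksGroupbyGPU_alt (p ++ [t])) := by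
  have hk := keys_mk_alt p
  have hcont : (PySem.Dict.mk (tasksGroupbyGPU_alt p)).contains (pvKey t)
      = decide (pvKey t ∈ p.map pvKey) := by
    rw [PySem.Dict.contains_eq_decide_mem_keys, hk]
    simp
  have halt : tasksGroupbyGPU_alt (p ++ [t]) =
      (PySem.List.dedup (p.map pvKey ++ [pvKey t])).map
        (fun u => (u, p.filter (fun s => pvKey s == u) ++ List.filter (fun s => pvKey s == u) [t])) := by
    simp only [tasksGroupbyGPU_alt, List.map_append, List.filter_append, List.map_cons, List.map_nil]
  by_cases h : pvKey t ∈ p.map pvKey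
  · rw [if_pos (by simp [hcont, h])]
    apply PySem.Dict.ext
    have hmem : (pvKey t, p.filter (fun s => pvKey s == pvKey t)) ∈ (PySem.Dict.mk (tasksGroupbyGPU_alt p)).items := by
      show _ ∈ tasksGroupbyGPU_alt p
      simp only [tasksGroupbyGPU_alt]
      exact List.mem_map_of_mem ((PySem.List.mem_dedup _ _).mpr h)
    have hnd : (PySem.Dict.mk (tasksGroupbyGPU_alt p)).keys.Nodup := by
      rw [hk]; exact PySem.List.nodup_dedup _
    rw [PySem.Dict.items_insert_of_contains _ _ (by simp [hcont, h]),
        PySem.Dict.getD_of_mem_items _ hmem hnd]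
    show (tasksGroupbyGPU_alt p).map _ = tasksGroupbyGPU_alt (p ++ [t])
    rw [halt, dedup_append_singleton, if_pos h]
    simp only [tasksGroupbyGPU_alt, List.map_map]
    apply List.map_congr_left
    intro v hv
    by_cases hvu : v = pvKey t
    · subst hvu; simp
    · simp [Function.comp, hvu, Ne.symm hvu, beq_iff_eq]
  · rw [if_neg (by simp [hcont, h])]
    apply PySem.Dict.ext
    rw [PySem.Dict.items_insert_of_not_contains _ _ (by simp [hcont, h])]
    show tasksGroupbyGPU_alt p ++ [(pvKey t, [t])] = tasksGroupbyGPU_alt (p ++ [t])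
    rw [halt, dedup_append_singleton, if_neg h, List.map_append]
    congr 1
    · simp only [tasksGroupbyGPU_alt]
      apply List.map_congr_left
      intro v hv
      have hvL : v ∈ p.map pvKey := (PySem.List.mem_dedup _ _).mp hv
      have hne : pvKey t ≠ v := fun e => h (e ▸ hvL)
      simp [hne, beq_iff_eq]
    · have hF : p.filter (fun s => pvKey s == pvKey t) = [] := by
        apply List.filter_eq_nil_iff.mpr
        intro s hs
        simp only [beq_iff_eq]
        intro e
        exact h (e ▸ List.mem_map_of_mem hs)
      simp [hF]

lemma fold_eq (tasks : List (List (String × String))) :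
    tasks.foldl (fun g t =>
      if g.contains (pvKey t) then
        g.insert (pvKey t) (g.getD (pvKey t) [] ++ [t])
      else
        g.insert (pvKey t) [t])
    (PySem.Dict.empty : PySem.Dict String (List (List (String × String)))) =
    PySem.Dict.mk (tasksGroupbyGPU_alt tasks) := by
  induction tasks using List.reverseRecOn with
  | nil => rfl
  | append_singleton p t ih =>
    rw [List.foldl_append, ih, List.foldl_cons, List.foldl_nil]
    exact fold_step p t

-- ===== VERDICT (by name: the statement is the Claim_ definition above) =====
theorem tasksGroupbyGPU_spec : Claim_equal_tasksGroupbyGPU := by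
  intro tasks _ _
  show tasksGroupbyGPU tasks = tasksGroupbyGPU_alt tasks
  rw [tasksGroupbyGPU, fold_eq]
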